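-- pv_equiv track=rewrite | github.com/ThomasKing2014/ScratchABit | utils.py | get_word_at_pos
-- ===== SOURCE A (Python) =====
-- import string
--
-- def get_word_at_pos(str, pos):
--     if pos < 0:
--         return None
--     word_chars = string.ascii_letters + string.digits + "._"
--     if str[pos] not in word_chars:
--         return None
--     beg = pos
--     while beg >= 1 and str[beg - 1] in word_chars:
--         beg -= 1
--     end = pos
--     while end < len(str) - 1 and str[end + 1] in word_chars:
--         end += 1
--     return str[beg:end + 1]
-- ===== SOURCE B (Python) =====
-- import re
-- import string
--
-- _WORD_RE = re.compile(r'[A-Za-z0-9._]+')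
--
-- def get_word_at_pos(str, pos):
--     if pos < 0:
--         return None
--     if str[pos] not in string.ascii_letters + string.digits + "._":
--         return None
--     for m in _WORD_RE.finditer(str):
--         if m.start() <= pos < m.end():
--             return m.group(0)
-- ===== Notes on version B (the rewrite author's own statement) =====
-- stated objective: idiomatic
-- what changed: Replaces A's two outward per-character while-scans from pos by a regex tokenize-then-select pass: re.finditer over the explicit class [A-Za-z0-9._]+ enumerates all maximal word tokens once and B returns the token whose span contains pos.
import Mathlib
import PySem

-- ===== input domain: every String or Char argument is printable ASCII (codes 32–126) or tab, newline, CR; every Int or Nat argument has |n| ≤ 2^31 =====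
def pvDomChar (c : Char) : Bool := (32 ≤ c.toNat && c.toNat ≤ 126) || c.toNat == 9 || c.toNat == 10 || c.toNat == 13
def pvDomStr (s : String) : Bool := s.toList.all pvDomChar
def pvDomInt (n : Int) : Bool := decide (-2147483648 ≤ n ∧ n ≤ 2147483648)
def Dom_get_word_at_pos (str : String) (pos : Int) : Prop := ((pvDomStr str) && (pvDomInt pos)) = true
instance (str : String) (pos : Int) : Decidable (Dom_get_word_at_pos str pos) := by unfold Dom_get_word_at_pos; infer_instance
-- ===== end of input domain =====

-- B replaces A's two outward while-scans from pos by a single tokenize-then-select pass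
-- (enumerate all maximal word tokens, return the one whose span contains pos); objective: idiomatic.

-- ===== PORT A =====

-- 'c in string.ascii_letters + string.digits + "._"' — exact char-class test for that literal string
def pvIsW (c : Char) : Bool :=
  ('A' ≤ c && c ≤ 'Z') || ('a' ≤ c && c ≤ 'z') || ('0' ≤ c && c ≤ '9') || c == '.' || c == '_'

-- 'while beg >= 1 and str[beg - 1] in word_chars: beg -= 1'  (index beg-1 is in range whenever read)
def pvBegLoop (l : List Char) : Nat → Nat
  | 0 => 0
  | b + 1 => if pvIsW (l.getD b ' ') then pvBegLoop l b else b + 1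

-- 'while end < len(str) - 1 and str[end + 1] in word_chars: end += 1'
def pvEndLoop (l : List Char) (e : Nat) : Nat :=
  if h : e + 1 < l.length ∧ pvIsW (l.getD (e + 1) ' ') then pvEndLoop l (e + 1) else e
termination_by l.length - e
decreasing_by omega

def get_word_at_pos (str : String) (pos : Int) : Option String :=
  if pos < 0 then none
  else
    match PySem.Str.pyGet? str pos with
    | none => none      -- str[pos] raises IndexError: excluded by Pre_
    | some c =>
      if !(pvIsW c) then none
      else
        let l := str.toList
        let p := pos.toNat
        let beg := pvBegLoop l p
        let e := pvEndLoop l p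
        some (PySem.Str.slice str (some (beg : Int)) (some ((e : Int) + 1)))

-- ===== PORT B =====

-- re.finditer(r'[A-Za-z0-9._]+', s): the maximal word-character runs of s as (start, token) pairs
def pvTokens (l : List Char) (i : Nat) : List (Nat × List Char) :=
  match l with
  | [] => []
  | c :: rest =>
    if pvIsW c then
      let w := c :: rest.takeWhile pvIsW
      (i, w) :: pvTokens (rest.dropWhile pvIsW) (i + w.length)
    else pvTokens rest (i + 1)
termination_by l.length
decreasing_by
  · have := List.length_dropWhile_le pvIsW rest; simp; omega
  · simp

def get_word_at_pos_alt (str : String) (pos : Int) : Option String :=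
  if pos < 0 then none
  else
    match PySem.Str.pyGet? str pos with
    | none => none      -- str[pos] raises IndexError: excluded by Pre_
    | some c =>
      if !(pvIsW c) then none
      else
        match (pvTokens str.toList 0).find?
            (fun t => decide (t.1 ≤ pos.toNat ∧ pos.toNat < t.1 + t.2.length)) with
        | some t => some (String.ofList t.2)
        | none => none

-- ===== PRECONDITION & SPEC =====
-- A raises IndexError at str[pos] when pos ≥ len(str); those inputs are excluded.
def Pre_get_word_at_pos (str : String) (pos : Int) : Prop := pos < (str.toList.length : Int)
instance (str : String) (pos : Int) : Decidable (Pre_get_word_at_pos str pos) := by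
  unfold Pre_get_word_at_pos; infer_instance
def pvWitness_get_word_at_pos : String × Int := ("a word.", 3)

def Spec_get_word_at_pos (str : String) (pos : Int) (out : Option String) : Prop := out = get_word_at_pos_alt str pos
instance (str : String) (pos : Int) (out : Option String) : Decidable (Spec_get_word_at_pos str pos out) := by unfold Spec_get_word_at_pos; infer_instance

-- ===== CLAIM (what is proved, stated in full; the proofs are below) =====
def Claim_equal_get_word_at_pos : Prop := ∀ (str : String) (pos : Int), Dom_get_word_at_pos str pos → Pre_get_word_at_pos str pos → Spec_get_word_at_pos str pos (get_word_at_pos str pos)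

-- ===== LEMMAS AND PROOFS =====

-- helper: takeWhile stops inside X when X holds a failing element
theorem pv_takeWhile_append_of_exists {f : Char → Bool} {X : List Char} (Y : List Char)
    (h : ∃ x ∈ X, f x = false) : (X ++ Y).takeWhile f = X.takeWhile f := by
  rw [List.takeWhile_append]
  split_ifs with hl
  · exfalso
    obtain ⟨x, hx, hfx⟩ := h
    have : X.takeWhile f = X := (X.takeWhile_sublist (p := f)).eq_of_length hl
    have := List.mem_takeWhile_imp (l := X) (p := f) (by rwa [this])
    simp [hfx] at this
  · rfl

theorem pv_takeWhile_append_cons {f : Char → Bool} {c : Char} (X Y : List Char)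
    (hc : f c = false) : (X ++ c :: Y).takeWhile f = X.takeWhile f := by
  rw [List.takeWhile_append]
  split_ifs with hl
  · have : X.takeWhile f = X := (X.takeWhile_sublist (p := f)).eq_of_length hl
    simp [hc, this]
  · rfl

-- helper: a position p within the maximal word-prefix: everything before it is a word char
-- and prefix-before-p ++ word-run-from-p is the whole maximal word-prefix
theorem pv_take_takeWhile {f : Char → Bool} :
    ∀ (p : Nat) (l : List Char), p ≤ (l.takeWhile f).length →
      (∀ x ∈ l.take p, f x = true) ∧ l.take p ++ (l.drop p).takeWhile f = l.takeWhile f := by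
  intro p
  induction p with
  | zero => intro l _; simp
  | succ q ih =>
    intro l hp
    match l with
    | [] => simp at hp
    | c :: rest =>
      by_cases hc : f c
      · rw [List.takeWhile_cons, if_pos hc] at hp ⊢
        simp only [List.length_cons] at hp
        obtain ⟨h1, h2⟩ := ih rest (by omega)
        refine ⟨?_, ?_⟩
        · intro x hx
          rw [List.take_succ_cons] at hx
          rcases List.mem_cons.mp hx with h | h
          · rwa [h]
          · exact h1 x h
        · rw [List.take_succ_cons, List.drop_succ_cons, List.cons_append, h2]
      · rw [List.takeWhile_cons, if_neg (by simp [hc])] at hp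
        simp at hp

theorem pvBegLoop_eq (l : List Char) (p : Nat) (hp : p ≤ l.length) :
    pvBegLoop l p = p - (((l.take p).reverse.takeWhile pvIsW).length) := by
  induction p with
  | zero => simp [pvBegLoop]
  | succ b ih =>
    have hb : b < l.length := by omega
    have htake : l.take (b+1) = l.take b ++ [l[b]] := List.take_succ_eq_append_getElem hb
    have hlen : ((l.take b).reverse.takeWhile pvIsW).length ≤ b := by
      have h1 := ((l.take b).reverse.takeWhile_sublist (p := pvIsW)).length_le
      simpa [Nat.min_eq_left (le_of_lt hb)] using h1
    have hge : l.getD b ' ' = l[b] := List.getD_eq_getElem l ' ' hb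
    have hrev : (l.take (b+1)).reverse = l[b] :: (l.take b).reverse := by rw [htake]; simp
    by_cases hw : pvIsW l[b]
    · have h1 : pvBegLoop l (b+1) = pvBegLoop l b := by
        simp only [pvBegLoop, hge, hw, if_pos]
      rw [h1, ih (by omega), hrev, List.takeWhile_cons, if_pos hw]
      simp only [List.length_cons]
      omega
    · have h1 : pvBegLoop l (b+1) = b + 1 := by
        simp only [pvBegLoop, hge, hw, if_false, Bool.false_eq_true]
      rw [h1, hrev, List.takeWhile_cons, if_neg (by simp [hw])]
      simp

theorem pvEndLoop_eq (l : List Char) (e : Nat) (he : e < l.length) (hw : pvIsW (l.getD e ' ')) :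
    pvEndLoop l e + 1 = e + ((l.drop e).takeWhile pvIsW).length := by
  rw [pvEndLoop]
  have hdrop : l.drop e = l[e] :: l.drop (e+1) := List.drop_eq_getElem_cons he
  have hge : l.getD e ' ' = l[e] := List.getD_eq_getElem l ' ' he
  split_ifs with h
  · have := pvEndLoop_eq l (e+1) h.1 h.2
    rw [hdrop, List.takeWhile_cons, if_pos (by rwa [← hge])]
    simp only [List.length_cons]
    omega
  · rw [hdrop, List.takeWhile_cons, if_pos (by rwa [← hge])]
    rcases Nat.lt_or_ge (e+1) l.length with h1 | h1
    · have hw2 : ¬ pvIsW (l.getD (e+1) ' ') := by tauto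
      rw [List.drop_eq_getElem_cons h1, List.takeWhile_cons,
          if_neg (by rwa [List.getD_eq_getElem l ' ' h1] at hw2)]
      simp
    · rw [List.drop_eq_nil_iff.mpr (by omega)]
      simp
termination_by l.length - e
decreasing_by omega

theorem pvTokens_find (l : List Char) (i p : Nat) (hp : p < l.length)
    (hw : pvIsW (l.getD p ' ')) :
    (pvTokens l i).find? (fun t => decide (t.1 ≤ i + p ∧ i + p < t.1 + t.2.length))
      = some (i + (p - ((l.take p).reverse.takeWhile pvIsW).length),
              ((l.take p).reverse.takeWhile pvIsW).reverse ++ (l.drop p).takeWhile pvIsW) := by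
  match l with
  | [] => simp at hp
  | c :: rest =>
    by_cases hc : pvIsW c
    · have hTok : pvTokens (c :: rest) i
          = (i, c :: rest.takeWhile pvIsW)
            :: pvTokens (rest.dropWhile pvIsW) (i + (c :: rest.takeWhile pvIsW).length) := by
        rw [pvTokens]; simp [hc]
      have hlw : (c :: rest).takeWhile pvIsW = c :: rest.takeWhile pvIsW := by
        rw [List.takeWhile_cons, if_pos hc]
      by_cases hpw : p < (c :: rest.takeWhile pvIsW).length
      · -- p lies inside the first token: find? returns it
        have hple : p ≤ ((c :: rest).takeWhile pvIsW).length := by rw [hlw]; omega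
        obtain ⟨hall, hsum⟩ := pv_take_takeWhile p (c :: rest) hple
        have hRfull : ((c :: rest).take p).reverse.takeWhile pvIsW
            = ((c :: rest).take p).reverse := by
          apply List.takeWhile_eq_self_iff.mpr
          intro x hx
          exact hall x (List.mem_reverse.mp hx)
        have hlenR : (((c :: rest).take p).reverse.takeWhile pvIsW).length = p := by
          rw [hRfull, List.length_reverse, List.length_take, Nat.min_eq_left (le_of_lt hp)]
        have hpw' : p < (rest.takeWhile pvIsW).length + 1 := by simpa using hpw
        rw [hTok, List.find?_cons_of_pos (by simp; omega)]
        rw [hlenR, Nat.sub_self, Nat.add_zero, hRfull, List.reverse_reverse, hsum, hlw]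
      · -- p lies beyond the first token: skip it and recurse past the run
        have hfd : ∀ (d : Char) (ds : List Char),
            rest.dropWhile pvIsW = d :: ds → pvIsW d = false := by
          intro d ds h
          have hne : rest.dropWhile pvIsW ≠ [] := by simp [h]
          have := List.head_dropWhile_not pvIsW hne
          simpa [h] using this
        have hsplit : (c :: rest)
            = (c :: rest.takeWhile pvIsW) ++ rest.dropWhile pvIsW := by
          simp [List.takeWhile_append_dropWhile]
        have hlenl : (c :: rest).length
            = (c :: rest.takeWhile pvIsW).length + (rest.dropWhile pvIsW).length := by
          rw [hsplit, List.length_append]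
        have hp' : p - (c :: rest.takeWhile pvIsW).length < (rest.dropWhile pvIsW).length := by
          omega
        have hget : (c :: rest).getD p ' '
            = (rest.dropWhile pvIsW).getD (p - (c :: rest.takeWhile pvIsW).length) ' ' := by
          rw [hsplit]
          exact List.getD_append_right _ _ _ _ (by omega)
        have hp1 : 1 ≤ p - (c :: rest.takeWhile pvIsW).length := by
          by_contra h0
          have hz : p - (c :: rest.takeWhile pvIsW).length = 0 := by omega
          rcases h : rest.dropWhile pvIsW with _ | ⟨d, ds⟩
          · rw [h] at hp'; simp at hp'
          · have := hfd d ds h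
            rw [hget, hz, h] at hw
            simp [this] at hw
        have key := pvTokens_find (rest.dropWhile pvIsW)
          (i + (c :: rest.takeWhile pvIsW).length)
          (p - (c :: rest.takeWhile pvIsW).length) hp' (by rw [← hget]; exact hw)
        have hidx : i + (c :: rest.takeWhile pvIsW).length
            + (p - (c :: rest.takeWhile pvIsW).length) = i + p := by omega
        rw [hidx] at key
        have hpw' : (rest.takeWhile pvIsW).length + 1 ≤ p := by simpa using hpw
        rw [hTok, List.find?_cons_of_neg (by simp; omega), key]
        have hdrop : (c :: rest).drop p
            = (rest.dropWhile pvIsW).drop (p - (c :: rest.takeWhile pvIsW).length) := by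
          rw [hsplit, List.drop_append, List.drop_eq_nil_of_le (by omega), List.nil_append]
        have htake : (c :: rest).take p
            = (c :: rest.takeWhile pvIsW)
              ++ (rest.dropWhile pvIsW).take (p - (c :: rest.takeWhile pvIsW).length) := by
          rw [hsplit, List.take_append, List.take_of_length_le (by omega)]
        have hX : ∃ x ∈ ((rest.dropWhile pvIsW).take
            (p - (c :: rest.takeWhile pvIsW).length)).reverse, pvIsW x = false := by
          rcases h : rest.dropWhile pvIsW with _ | ⟨d, ds⟩
          · rw [h] at hp'; simp at hp'
          · obtain ⟨q, hq⟩ : ∃ q, p - (c :: rest.takeWhile pvIsW).length = q + 1 :=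
              ⟨p - (c :: rest.takeWhile pvIsW).length - 1, by omega⟩
            refine ⟨d, ?_, hfd d ds h⟩
            rw [hq, List.take_succ_cons, List.mem_reverse]
            exact List.mem_cons_self
        have hrtw : ((c :: rest).take p).reverse.takeWhile pvIsW
            = (((rest.dropWhile pvIsW).take
                (p - (c :: rest.takeWhile pvIsW).length)).reverse).takeWhile pvIsW := by
          rw [htake, List.reverse_append]
          exact pv_takeWhile_append_of_exists _ hX
        have hA : ((((rest.dropWhile pvIsW).take
            (p - (c :: rest.takeWhile pvIsW).length)).reverse).takeWhile pvIsW).length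
            ≤ p - (c :: rest.takeWhile pvIsW).length := by
          have h1 := (((rest.dropWhile pvIsW).take
            (p - (c :: rest.takeWhile pvIsW).length)).reverse.takeWhile_sublist
            (p := pvIsW)).length_le
          rw [List.length_reverse, List.length_take] at h1
          omega
        rw [hrtw, hdrop]
        simp only [Option.some.injEq, Prod.mk.injEq]
        exact ⟨by omega, trivial⟩
    · have hTok : pvTokens (c :: rest) i = pvTokens rest (i + 1) := by
        rw [pvTokens]; simp [hc]
      match p with
      | 0 => rw [List.getD_cons_zero] at hw; simp [hw] at hc
      | q + 1 =>
        have key := pvTokens_find rest (i + 1) q (by simpa using hp)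
          (by rwa [List.getD_cons_succ] at hw)
        have hidx : i + 1 + q = i + (q + 1) := by omega
        rw [hidx] at key
        rw [hTok, key]
        have hrtw : ((c :: rest).take (q + 1)).reverse.takeWhile pvIsW
            = ((rest.take q).reverse).takeWhile pvIsW := by
          rw [List.take_succ_cons, List.reverse_cons]
          exact pv_takeWhile_append_cons _ [] (by simp [hc])
        have hA : (((rest.take q).reverse).takeWhile pvIsW).length ≤ q := by
          have h1 := ((rest.take q).reverse.takeWhile_sublist (p := pvIsW)).length_le
          rw [List.length_reverse, List.length_take] at h1
          omega
        rw [hrtw, List.drop_succ_cons]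
        simp only [Option.some.injEq, Prod.mk.injEq]
        exact ⟨by omega, trivial⟩
termination_by l.length
decreasing_by
  · have := List.length_dropWhile_le pvIsW rest; simp; omega
  · simp


theorem pv_slice_eq (l : List Char) (p : Nat) (hp : p ≤ l.length) :
    (l.drop (p - ((l.take p).reverse.takeWhile pvIsW).length)).take
      (p + ((l.drop p).takeWhile pvIsW).length
        - (p - ((l.take p).reverse.takeWhile pvIsW).length))
    = ((l.take p).reverse.takeWhile pvIsW).reverse ++ (l.drop p).takeWhile pvIsW := by
  set X := l.take p with hX
  set R := X.reverse.takeWhile pvIsW with hR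
  set T := (l.drop p).takeWhile pvIsW with hT
  have hXlen : X.length = p := by rw [hX, List.length_take, Nat.min_eq_left hp]
  have ha : R.length ≤ p := by
    have h1 := (X.reverse.takeWhile_sublist (p := pvIsW)).length_le
    rw [List.length_reverse, hXlen, ← hR] at h1
    exact h1
  have hRtake : X.reverse.take R.length = R :=
    (List.prefix_iff_eq_take.mp (List.takeWhile_prefix _)).symm
  have hdropX : X.drop (p - R.length) = R.reverse := by
    have h1 : X.reverse.take R.length = (X.drop (X.length - R.length)).reverse :=
      List.take_reverse
    rw [hXlen, hRtake] at h1
    conv_rhs => rw [h1]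
    rw [List.reverse_reverse]
  have hTtake : (l.drop p).take T.length = T :=
    (List.prefix_iff_eq_take.mp (List.takeWhile_prefix _)).symm
  have hl : l = X ++ l.drop p := by rw [hX, List.take_append_drop]
  conv_lhs => rw [hl]
  rw [List.drop_append, hdropX, hXlen]
  have h0 : p - R.length - p = 0 := by omega
  rw [h0, List.drop_zero]
  have h1 : p + T.length - (p - R.length) = R.length + T.length := by omega
  rw [h1, List.take_append, List.take_of_length_le (by rw [List.length_reverse]; omega),
      List.length_reverse]
  have h2 : R.length + T.length - R.length = T.length := by omega
  rw [h2, hTtake]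

-- ===== VERDICT (by name: the statement is the Claim_ definition above) =====
theorem get_word_at_pos_spec : Claim_equal_get_word_at_pos := by
  intro str pos hdom hpre
  unfold Pre_get_word_at_pos at hpre
  unfold Spec_get_word_at_pos get_word_at_pos get_word_at_pos_alt
  by_cases hneg : pos < 0
  · simp [hneg]
  · have h0 : 0 ≤ pos := by omega
    have hplen : pos.toNat < str.toList.length := by omega
    have hget : PySem.Str.pyGet? str pos = some str.toList[pos.toNat] := by
      have h1 := PySem.List.pyGet?_of_nonneg (xs := str.toList) (i := pos) h0
      simp [pysem, h1, List.getElem?_eq_getElem hplen]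
    rw [if_neg hneg, if_neg hneg, hget]
    by_cases hw : pvIsW str.toList[pos.toNat]
    · simp only [hw, Bool.not_true, Bool.false_eq_true, if_false]
      have hwD : pvIsW (str.toList.getD pos.toNat ' ') := by
        rwa [List.getD_eq_getElem str.toList ' ' hplen]
      have hfind := pvTokens_find str.toList 0 pos.toNat hplen hwD
      simp only [Nat.zero_add] at hfind
      rw [hfind]
      have hbeg := pvBegLoop_eq str.toList pos.toNat (le_of_lt hplen)
      have hend := pvEndLoop_eq str.toList pos.toNat hplen hwD
      congr 1
      apply String.toList_inj.mp
      rw [String.toList_ofList]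
      have hslice : (PySem.Str.slice str (some (pvBegLoop str.toList pos.toNat : Int))
            (some (((pvEndLoop str.toList pos.toNat : Nat) : Int) + 1))).toList
          = (str.toList.drop (pvBegLoop str.toList pos.toNat)).take
              (pvEndLoop str.toList pos.toNat + 1 - pvBegLoop str.toList pos.toNat) := by
        have hb := PySem.List.slice_natCast (xs := str.toList)
          (a := pvBegLoop str.toList pos.toNat) (b := pvEndLoop str.toList pos.toNat + 1)
        push_cast at hb
        simp [pysem, hb]
      rw [hslice, hbeg, hend]
      exact pv_slice_eq str.toList pos.toNat (le_of_lt hplen)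
    · simp [hw]
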